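-- pv_equiv track=rewrite | github.com/kisblilla/interview | secondtask.py | horizontal_right
-- ===== SOURCE A (Python) =====
-- def compare(arr, obstacles):
--     for k in range(len(obstacles)):
--         obstac=(obstacles[k][0], obstacles[k][1])
--         comparison=arr==obstac
--         if comparison==True:
--             return True
--
-- def horizontal_right(n, rq, cq, obstacles, counter):
--
--     i=1
--     while (cq-i)>0:
--         arr=(rq,cq-i)
--         if compare(arr,obstacles)==True:
--                 return counter
--         counter= counter +1
--         i=i+1
--     return (counter)
-- ===== SOURCE B (Python) =====
-- def horizontal_right(n, rq, cq, obstacles, counter):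
--     if cq <= 1:
--         return counter
--     best = None
--     for o in obstacles:
--         if o[0] == rq and 0 < o[1] < cq:
--             if best is None or o[1] > best:
--                 best = o[1]
--     if best is None:
--         return counter + (cq - 1)
--     return counter + (cq - 1 - best)
-- ===== Notes on version B (the rewrite author's own statement) =====
-- stated objective: faster
-- what changed: Replaces the cell-by-cell leftward walk (each step scanning all obstacles) with a single pass over obstacles that keeps the maximum blocking column in the row, then computes the count by arithmetic.
import Mathlib
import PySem

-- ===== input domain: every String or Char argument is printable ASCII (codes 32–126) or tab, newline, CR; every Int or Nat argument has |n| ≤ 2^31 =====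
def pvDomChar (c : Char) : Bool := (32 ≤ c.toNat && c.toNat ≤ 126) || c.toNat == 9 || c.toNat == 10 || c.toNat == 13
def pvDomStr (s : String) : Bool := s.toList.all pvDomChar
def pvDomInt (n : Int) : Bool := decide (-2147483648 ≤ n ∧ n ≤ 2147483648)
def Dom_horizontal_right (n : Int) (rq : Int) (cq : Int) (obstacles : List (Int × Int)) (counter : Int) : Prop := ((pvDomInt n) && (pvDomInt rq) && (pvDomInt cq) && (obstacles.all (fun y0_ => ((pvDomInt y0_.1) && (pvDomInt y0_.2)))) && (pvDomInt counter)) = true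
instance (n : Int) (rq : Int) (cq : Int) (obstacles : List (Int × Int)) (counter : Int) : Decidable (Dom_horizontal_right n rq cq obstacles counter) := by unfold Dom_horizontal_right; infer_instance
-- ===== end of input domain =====

-- B replaces A's cell-by-cell leftward walk (each step scanning all obstacles) by one pass over
-- obstacles keeping the maximum blocking column in row rq, then closed-form arithmetic: faster.

-- ===== PORT A =====
-- Python `compare`: returns True on the first match, falls off the end (None) otherwise.
def compareA (arr : Int × Int) : List (Int × Int) → Option Bool
  | [] => none
  | o :: rest => if arr = (o.1, o.2) then some true else compareA arr rest

-- the while loop of A; runs while cq - i > 0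
def loopA (rq : Int) (cq : Int) (obstacles : List (Int × Int)) (counter : Int) (i : Int) : Int :=
  if h : cq - i > 0 then
    if compareA (rq, cq - i) obstacles = some true then counter
    else loopA rq cq obstacles (counter + 1) (i + 1)
  else counter
termination_by (cq - i).toNat
decreasing_by omega

def horizontal_right (n : Int) (rq : Int) (cq : Int) (obstacles : List (Int × Int)) (counter : Int) : Int :=
  loopA rq cq obstacles counter 1

-- ===== PORT B =====
-- one step of B's scan: keep the maximum column among obstacles (rq, c) with 0 < c < cq
def bestStep (rq : Int) (cq : Int) (best : Option Int) (o : Int × Int) : Option Int :=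
  if o.1 = rq ∧ 0 < o.2 ∧ o.2 < cq then
    match best with
    | none => some o.2
    | some b => if o.2 > b then some o.2 else some b
  else best

def horizontal_right_alt (n : Int) (rq : Int) (cq : Int) (obstacles : List (Int × Int)) (counter : Int) : Int :=
  if cq ≤ 1 then counter
  else
    match obstacles.foldl (bestStep rq cq) none with
    | none => counter + (cq - 1)
    | some b => counter + (cq - 1 - b)

-- ===== PRECONDITION & SPEC =====
def Spec_horizontal_right (n : Int) (rq : Int) (cq : Int) (obstacles : List (Int × Int)) (counter : Int) (out : Int) : Prop := out = horizontal_right_alt n rq cq obstacles counter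
instance (n : Int) (rq : Int) (cq : Int) (obstacles : List (Int × Int)) (counter : Int) (out : Int) : Decidable (Spec_horizontal_right n rq cq obstacles counter out) := by unfold Spec_horizontal_right; infer_instance

-- ===== CLAIM (what is proved, stated in full; the proofs are below) =====
def Claim_equal_horizontal_right : Prop := ∀ (n : Int) (rq : Int) (cq : Int) (obstacles : List (Int × Int)) (counter : Int), Dom_horizontal_right n rq cq obstacles counter → Spec_horizontal_right n rq cq obstacles counter (horizontal_right n rq cq obstacles counter)

-- ===== LEMMAS AND PROOFS =====

-- compareA answers membership (some true iff present, else none)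
theorem compareA_eq (arr : Int × Int) (obs : List (Int × Int)) :
    compareA arr obs = if arr ∈ obs then some true else none := by
  induction obs with
  | nil => simp [compareA]
  | cons o rest ih =>
    simp only [compareA, ih]
    by_cases h : arr = (o.1, o.2) <;> simp_all

-- once the accumulator holds c0 and every candidate column is ≤ c0, the fold keeps c0
theorem fold_stays_some (rq c0 : Int) (obs : List (Int × Int)) :
    obs.foldl (bestStep rq (c0 + 1)) (some c0) = some c0 := by
  induction obs with
  | nil => rfl
  | cons o rest ih =>
    simp only [List.foldl_cons, bestStep]
    split_ifs with h h2
    · omega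
    · exact ih
    · exact ih

-- if (rq, c0) is an obstacle and the bound is c0 + 1, the scan ends at exactly c0
theorem fold_hit (rq c0 : Int) (hc0 : 0 < c0) (obs : List (Int × Int)) :
    ∀ acc : Option Int, (∀ b, acc = some b → b ≤ c0) → (rq, c0) ∈ obs →
      obs.foldl (bestStep rq (c0 + 1)) acc = some c0 := by
  induction obs with
  | nil => intro acc _ hmem; simp at hmem
  | cons o rest ih =>
    intro acc hacc hmem
    simp only [List.foldl_cons]
    rcases List.mem_cons.mp hmem with heq | hmem'
    · have ho : (bestStep rq (c0 + 1) acc o) = some c0 := by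
        subst heq
        simp only [bestStep]
        split_ifs with hcond
        · cases acc with
          | none => rfl
          | some b =>
            have hb := hacc b rfl
            simp only
            split_ifs with h2
            · simp
            · simp; omega
        · exact absurd ⟨by trivial, hc0, by omega⟩ hcond
      rw [ho]; exact fold_stays_some rq c0 rest
    · apply ih
      · intro b hb
        simp only [bestStep] at hb
        split_ifs at hb with h
        · cases acc with
          | none => simp at hb; omega
          | some b' =>
            have hb' := hacc b' rfl
            simp only at hb
            split_ifs at hb with h2 <;> simp at hb <;> omega
        · exact hacc b hb
      · exact hmem'

-- if (rq, c0) is not an obstacle, shrinking the bound from c0 + 1 to c0 does not change the fold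
theorem fold_bound_shrink (rq c0 : Int) (obs : List (Int × Int)) (hno : (rq, c0) ∉ obs) :
    ∀ acc : Option Int, obs.foldl (bestStep rq (c0 + 1)) acc = obs.foldl (bestStep rq c0) acc := by
  induction obs with
  | nil => intro acc; rfl
  | cons o rest ih =>
    intro acc
    have hno' : (rq, c0) ∉ rest := fun h => hno (List.mem_cons_of_mem _ h)
    have hneq : o ≠ (rq, c0) := fun h => hno (by simp [h])
    simp only [List.foldl_cons]
    have hstep : bestStep rq (c0 + 1) acc o = bestStep rq c0 acc o := by
      simp only [bestStep]
      by_cases h1 : o.1 = rq ∧ 0 < o.2 ∧ o.2 < c0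
      · rw [if_pos h1, if_pos ⟨h1.1, h1.2.1, by omega⟩]
      · by_cases h2 : o.1 = rq ∧ 0 < o.2 ∧ o.2 < c0 + 1
        · exact absurd (Prod.ext h2.1 (by omega)) hneq
        · rw [if_neg h1, if_neg h2]
    rw [hstep, ih hno']

-- with bound ≤ 1 there is no admissible column, so the scan finds nothing
theorem fold_none_of_bound_le_one (rq bound : Int) (hb : bound ≤ 1) (obs : List (Int × Int)) :
    obs.foldl (bestStep rq bound) none = none := by
  induction obs with
  | nil => rfl
  | cons o rest ih =>
    simp only [List.foldl_cons, bestStep]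
    rw [if_neg (by omega)]
    exact ih

-- B's closed form with a general bound; the loop started at index i matches bound = cq - i + 1
def altGen (rq : Int) (bound : Int) (obs : List (Int × Int)) (counter : Int) : Int :=
  if bound ≤ 1 then counter
  else counter + (bound - 1 - ((obs.foldl (bestStep rq bound) none).getD 0))

theorem loopA_eq_altGen (rq cq : Int) (obs : List (Int × Int)) :
    ∀ (k : Nat) (i counter : Int), (cq - i).toNat = k →
      loopA rq cq obs counter i = altGen rq (cq - i + 1) obs counter := by
  intro k
  induction k with
  | zero =>
    intro i counter hk
    rw [loopA, dif_neg (by omega)]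
    simp only [altGen]
    rw [if_pos (by omega)]
  | succ k ih =>
    intro i counter hk
    have h : cq - i > 0 := by omega
    rw [loopA, dif_pos h]
    by_cases hmem : (rq, cq - i) ∈ obs
    · rw [if_pos (by rw [compareA_eq, if_pos hmem])]
      have hfold := fold_hit rq (cq - i) h obs none (by intro b hb; cases hb) hmem
      simp only [altGen]
      rw [if_neg (by omega), hfold, Option.getD_some]
      ring
    · rw [if_neg (by rw [compareA_eq, if_neg hmem]; simp)]
      rw [ih (i + 1) (counter + 1) (by omega)]
      have hsh := fold_bound_shrink rq (cq - i) obs hmem none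
      have e1 : cq - (i + 1) + 1 = cq - i := by ring
      rw [e1]
      simp only [altGen]
      by_cases h2 : cq - i ≤ 1
      · rw [if_pos h2, if_neg (by omega), hsh,
          fold_none_of_bound_le_one rq (cq - i) h2 obs, Option.getD_none]
        omega
      · rw [if_neg h2, if_neg (by omega), hsh]
        ring

-- ===== VERDICT (by name: the statement is the Claim_ definition above) =====
theorem horizontal_right_spec : Claim_equal_horizontal_right := by
  intro n rq cq obstacles counter _
  unfold Spec_horizontal_right horizontal_right horizontal_right_alt
  rw [loopA_eq_altGen rq cq obstacles (cq - 1).toNat 1 counter rfl]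
  simp only [altGen]
  have e : cq - 1 + 1 = cq := by ring
  rw [e]
  by_cases hcq : cq ≤ 1
  · rw [if_pos hcq, if_pos hcq]
  · rw [if_neg hcq, if_neg hcq]
    cases hf : obstacles.foldl (bestStep rq cq) none with
    | none => rw [Option.getD_none]; show counter + (cq - 1 - 0) = counter + (cq - 1); ring
    | some b => rw [Option.getD_some]
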